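-- pv_equiv track=rewrite | github.com/ADDY-IN/Hirelynx_Project | app/services/scoring.py | _extract_edu_tier
-- ===== SOURCE A (Python) =====
-- from typing import List, Dict, Any, Optional, Tuple
--
-- def _extract_edu_tier(data: Dict) -> int:
--     tiers = []
--     for edu in data.get("education", []):
--         deg = str(edu.get("degree", "")).lower()
--         if any(k in deg for k in ["phd", "doctor"]): tiers.append(6)
--         elif "master" in deg: tiers.append(5)
--         elif "bachelor" in deg: tiers.append(4)
--         elif "diploma" in deg: tiers.append(2)
--     return max(tiers, default=0)
-- ===== SOURCE B (Python) =====
-- def _extract_edu_tier(data):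
--     degrees = [str(edu.get("degree", "")).lower() for edu in data.get("education", [])]
--     for kws, tier in ((("phd", "doctor"), 6), (("master",), 5), (("bachelor",), 4), (("diploma",), 2)):
--         if any(k in d for k in kws for d in degrees):
--             return tier
--     return 0
-- ===== Notes on version B (the rewrite author's own statement) =====
-- stated objective: simpler
-- what changed: Replaces the per-entry if/elif ladder plus tiers list and max() with a single descending scan over a keyword->tier table that early-returns the first tier whose keyword occurs in any degree, so no tier list is ever built.
import Mathlib
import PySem

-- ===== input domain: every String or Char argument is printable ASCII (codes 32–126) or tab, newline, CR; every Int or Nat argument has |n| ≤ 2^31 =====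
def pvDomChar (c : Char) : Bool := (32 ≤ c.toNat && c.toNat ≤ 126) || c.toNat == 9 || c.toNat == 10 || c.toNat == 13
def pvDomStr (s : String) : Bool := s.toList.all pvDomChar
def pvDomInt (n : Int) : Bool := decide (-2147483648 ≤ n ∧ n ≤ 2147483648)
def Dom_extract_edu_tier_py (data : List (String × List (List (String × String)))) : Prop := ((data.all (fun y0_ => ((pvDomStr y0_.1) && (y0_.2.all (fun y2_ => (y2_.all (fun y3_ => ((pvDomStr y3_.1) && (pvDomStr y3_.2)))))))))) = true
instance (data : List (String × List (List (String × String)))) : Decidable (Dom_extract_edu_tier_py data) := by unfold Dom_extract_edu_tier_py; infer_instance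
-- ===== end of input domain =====

-- B replaces A's per-entry if/elif ladder + tiers list + max() with a descending scan over a
-- keyword→tier table that returns the first tier whose keyword occurs in some degree (simpler).

-- ===== PORT A =====
def extract_edu_tier_py (data : List (String × List (List (String × String)))) : Int :=
  let tiers : List Int :=
    (PySem.Dict.getD (PySem.Dict.mk data) "education" []).foldl
      (fun tiers edu =>
        let deg := PySem.Str.lower (PySem.Dict.getD (PySem.Dict.mk edu) "degree" "")
        if ["phd", "doctor"].any (fun k => PySem.Str.isIn k deg) then tiers ++ [6]
        else if PySem.Str.isIn "master" deg then tiers ++ [5]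
        else if PySem.Str.isIn "bachelor" deg then tiers ++ [4]
        else if PySem.Str.isIn "diploma" deg then tiers ++ [2]
        else tiers) []
  PySem.List.maxD tiers (fun x => x) 0

-- ===== PORT B =====
-- the keyword→tier dispatch table, in descending tier order
def pvTable : List (List String × Int) :=
  [(["phd", "doctor"], 6), (["master"], 5), (["bachelor"], 4), (["diploma"], 2)]

-- the for-loop over the table with its early return
def pvScan (degrees : List String) : List (List String × Int) → Int
  | [] => 0
  | (kws, tier) :: rest =>
      if kws.any (fun k => degrees.any (fun d => PySem.Str.isIn k d)) then tier
      else pvScan degrees rest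

def extract_edu_tier_py_alt (data : List (String × List (List (String × String)))) : Int :=
  let degrees :=
    (PySem.Dict.getD (PySem.Dict.mk data) "education" []).map
      (fun edu => PySem.Str.lower (PySem.Dict.getD (PySem.Dict.mk edu) "degree" ""))
  pvScan degrees pvTable

-- ===== PRECONDITION & SPEC =====
def Spec_extract_edu_tier_py (data : List (String × List (List (String × String)))) (out : Int) : Prop := out = extract_edu_tier_py_alt data
instance (data : List (String × List (List (String × String)))) (out : Int) : Decidable (Spec_extract_edu_tier_py data out) := by unfold Spec_extract_edu_tier_py; infer_instance

-- ===== CLAIM (what is proved, stated in full; the proofs are below) =====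
def Claim_equal_extract_edu_tier_py : Prop := ∀ (data : List (String × List (List (String × String)))), Dom_extract_edu_tier_py data → Spec_extract_edu_tier_py data (extract_edu_tier_py data)

-- ===== LEMMAS AND PROOFS =====

-- the optional tier A's if/elif ladder assigns to one lowered degree string
def pvTier1 (deg : String) : Option Int :=
  if ["phd", "doctor"].any (fun k => PySem.Str.isIn k deg) then some 6
  else if PySem.Str.isIn "master" deg then some 5
  else if PySem.Str.isIn "bachelor" deg then some 4
  else if PySem.Str.isIn "diploma" deg then some 2
  else none

-- the nested-if value of B's scan, as a function of the four match flags
def pvNest (x6 x5 x4 x2 : Bool) : Int :=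
  if x6 then 6 else if x5 then 5 else if x4 then 4 else if x2 then 2 else 0

lemma pvFoldl_eq_filterMap {α : Type} (f : α → String) (l : List α) (acc : List Int) :
    l.foldl
      (fun tiers x =>
        if ["phd", "doctor"].any (fun k => PySem.Str.isIn k (f x)) then tiers ++ [6]
        else if PySem.Str.isIn "master" (f x) then tiers ++ [5]
        else if PySem.Str.isIn "bachelor" (f x) then tiers ++ [4]
        else if PySem.Str.isIn "diploma" (f x) then tiers ++ [2]
        else tiers) acc
      = acc ++ (l.map f).filterMap pvTier1 := by
  induction l generalizing acc with
  | nil => simp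
  | cons d rest ih =>
      rw [List.foldl_cons, ih, List.map_cons, List.filterMap_cons]
      unfold pvTier1
      split_ifs <;> simp

lemma pvFoldl_max_max (l : List Int) (a b : Int) :
    l.foldl max (max a b) = max a (l.foldl max b) := by
  induction l generalizing b with
  | nil => rfl
  | cons x t ih =>
      simp only [List.foldl_cons]
      rw [max_assoc, ih]

lemma pvFoldl_max_cons (v : Int) (L : List Int) :
    List.foldl max 0 (v :: L) = max v (List.foldl max 0 L) := by
  rw [List.foldl_cons, max_comm 0 v, pvFoldl_max_max]

lemma pvMaxD_eq_foldl (l : List Int) (h : ∀ x ∈ l, 0 ≤ x) :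
    PySem.List.maxD l (fun x => x) 0 = l.foldl max 0 := by
  cases l with
  | nil => rfl
  | cons x t =>
      have hx : (0 : Int) ≤ x := h x (by simp)
      have := PySem.List.max?_id_cons x t
      simp only [PySem.List.maxD, this, Option.getD_some]
      rw [List.foldl_cons, max_eq_right hx]

lemma pvNest_cons (p1 p2 m ba di q1 q2 qm qba qdi : Bool) :
    pvNest ((p1 || q1) || (p2 || q2)) (m || qm) (ba || qba) (di || qdi)
      = max (pvNest (p1 || p2) m ba di) (pvNest (q1 || q2) qm qba qdi) := by
  cases p1 <;> cases p2 <;> cases m <;> cases ba <;> cases di <;>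
    cases q1 <;> cases q2 <;> cases qm <;> cases qba <;> cases qdi <;> decide

lemma pvScan_eq_nest (degs : List String) :
    pvScan degs pvTable
      = pvNest (degs.any (fun d => PySem.Str.isIn "phd" d) || degs.any (fun d => PySem.Str.isIn "doctor" d))
          (degs.any (fun d => PySem.Str.isIn "master" d))
          (degs.any (fun d => PySem.Str.isIn "bachelor" d))
          (degs.any (fun d => PySem.Str.isIn "diploma" d)) := by
  simp [pvScan, pvTable, pvNest]

lemma pvMain (degs : List String) :
    (degs.filterMap pvTier1).foldl max 0
      = pvNest (degs.any (fun d => PySem.Str.isIn "phd" d) || degs.any (fun d => PySem.Str.isIn "doctor" d))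
          (degs.any (fun d => PySem.Str.isIn "master" d))
          (degs.any (fun d => PySem.Str.isIn "bachelor" d))
          (degs.any (fun d => PySem.Str.isIn "diploma" d)) := by
  induction degs with
  | nil => simp [pvNest]
  | cons d rest ih =>
      simp only [List.any_cons]
      rw [pvNest_cons, ← ih, List.filterMap_cons]
      simp only [pvTier1, List.any_cons, List.any_nil, Bool.or_false]
      split_ifs with h1 h2 h3 h4
      · rw [pvFoldl_max_cons]; congr 1; clear ih; simp_all [pvNest]
      · rw [pvFoldl_max_cons]; congr 1; clear ih; simp_all [pvNest]
      · rw [pvFoldl_max_cons]; congr 1; clear ih; simp_all [pvNest]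
      · rw [pvFoldl_max_cons]; congr 1; clear ih; simp_all [pvNest]
      · clear ih; simp_all [pvNest]
        exact (PySem.List.le_foldl_max _ 0).1

lemma pvTiers_nonneg (degs : List String) : ∀ x ∈ degs.filterMap pvTier1, (0:Int) ≤ x := by
  intro x hx
  rcases List.mem_filterMap.mp hx with ⟨d, _, hd⟩
  unfold pvTier1 at hd
  split_ifs at hd <;> simp_all <;> omega

-- ===== VERDICT (by name: the statement is the Claim_ definition above) =====
theorem extract_edu_tier_py_spec : Claim_equal_extract_edu_tier_py := by
  intro data _
  unfold Spec_extract_edu_tier_py extract_edu_tier_py extract_edu_tier_py_alt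
  rw [pvFoldl_eq_filterMap, List.nil_append,
    pvMaxD_eq_foldl _ (pvTiers_nonneg _), pvScan_eq_nest, pvMain]
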